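-- pv_equiv track=rewrite | github.com/dsynkd/leetcode | 1577.number_of_ways_where_square_of_number_is_equal_to_product_of_two_numbers.py | numTriplets
-- ===== SOURCE A (Python) =====
-- from collections import defaultdict
--
-- def numTriplets(nums1:list[int], nums2: list[int]) -> int:
--     res = 0
--     for n1 in nums1:
--         factors = defaultdict(int)
--         for n2 in nums2:
--             if (n1*n1)%n2 == 0:
--                 factor = (n1*n1)//n2
--                 res += factors[factor]
--                 factors[n2] += 1
--
--     for n1 in nums2:
--         factors = defaultdict(int)
--         for n2 in nums1:
--             if (n1*n1)%n2 == 0: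
--                 factor = (n1*n1)//n2
--                 res += factors[factor]
--                 factors[n2] += 1
--     return res
-- ===== SOURCE B (Python) =====
-- def _square_counter(bases):
--     """Counter of n*n over bases."""
--     sq = {}
--     for n in bases:
--         t = n * n
--         sq[t] = sq.get(t, 0) + 1
--     return sq
--
--
-- def _pair_scan(sq, others):
--     """Sum over unordered pairs {i<j} of others of sq.get(product, 0)."""
--     if not others:
--         return 0
--     x, rest = others[0], others[1:]
--     total = 0
--     for y in rest:
--         total += sq.get(x * y, 0)
--     return total + _pair_scan(sq, rest)
--
--
-- def numTriplets(nums1, nums2):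
--     return _pair_scan(_square_counter(nums1), nums2) + _pair_scan(_square_counter(nums2), nums1)
-- ===== Notes on version B (the rewrite author's own statement) =====
-- stated objective: alternative
-- what changed: Instead of A's per-element divisor scan (for each n1, walk the other list testing (n1*n1)%n2==0 with an incremental defaultdict of seen factors, which divides and so raises ZeroDivisionError on zeros), B builds one counter of squares per list and scans the unordered pairs of the other list, looking each product up in that counter; no division at all.
-- crash fix: A raises ZeroDivisionError whenever the scanned list contains 0 while the other list is nonempty ((nums1 nonempty and 0 in nums2) or (nums2 nonempty and 0 in nums1)); B, which never divides, returns the true triplet count there (0 at the witness ([1],[0])). — e.g. on numTriplets([1], [0]): A raises ZeroDivisionError, B returns 0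
import Mathlib
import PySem

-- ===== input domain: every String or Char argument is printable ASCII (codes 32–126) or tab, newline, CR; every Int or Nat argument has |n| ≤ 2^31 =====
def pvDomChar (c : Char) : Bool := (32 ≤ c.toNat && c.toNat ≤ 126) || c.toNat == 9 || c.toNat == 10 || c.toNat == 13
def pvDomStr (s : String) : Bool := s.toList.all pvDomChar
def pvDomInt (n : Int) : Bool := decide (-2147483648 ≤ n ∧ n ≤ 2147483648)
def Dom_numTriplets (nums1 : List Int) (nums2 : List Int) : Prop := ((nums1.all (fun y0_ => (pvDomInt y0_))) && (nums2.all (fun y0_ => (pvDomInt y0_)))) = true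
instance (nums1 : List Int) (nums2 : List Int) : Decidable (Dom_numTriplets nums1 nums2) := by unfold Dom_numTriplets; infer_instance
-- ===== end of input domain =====

-- B replaces A's per-element divisor scan (with its incremental factor dict and division)
-- by one counter of squares per list plus a scan of the unordered pairs of the other list;
-- equivalence is proved on Pre_, which excludes exactly the inputs where A raises ZeroDivisionError.

-- ===== PORT A =====
-- inner loop body: if (n1*n1)%n2 == 0: res += factors[(n1*n1)//n2]; factors[n2] += 1
def pvStepA (t : Int) (st : Int × PySem.Dict Int Int) (n2 : Int) : Int × PySem.Dict Int Int :=
  if PySem.Int.mod t n2 == 0 then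
    let factor := PySem.Int.floordiv t n2
    (st.1 + st.2.getD factor 0, st.2.insert n2 (st.2.getD n2 0 + 1))
  else st

-- one of A's two symmetric outer loops, accumulating into res
def pvLoopA (res : Int) (outer : List Int) (inner : List Int) : Int :=
  outer.foldl (fun res n1 => (inner.foldl (pvStepA (n1 * n1)) (res, PySem.Dict.empty)).1) res

def numTriplets (nums1 : List Int) (nums2 : List Int) : Int :=
  pvLoopA (pvLoopA 0 nums1 nums2) nums2 nums1

-- ===== PORT B =====
-- _square_counter: counter of n*n over bases
def pvSquareCounter (bases : List Int) : PySem.Dict Int Int :=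
  bases.foldl (fun sq n => sq.insert (n * n) (sq.getD (n * n) 0 + 1)) PySem.Dict.empty

-- _pair_scan: sum over unordered pairs {i<j} of others of sq.get(product, 0)
def pvPairScan (sq : PySem.Dict Int Int) : List Int → Int
  | [] => 0
  | x :: rest => rest.foldl (fun total y => total + sq.getD (x * y) 0) 0 + pvPairScan sq rest

def numTriplets_alt (nums1 : List Int) (nums2 : List Int) : Int :=
  pvPairScan (pvSquareCounter nums1) nums2 + pvPairScan (pvSquareCounter nums2) nums1

-- ===== PRECONDITION & SPEC =====
-- Pre_ excludes exactly the inputs on which A raises ZeroDivisionError: a 0 in the list that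
-- A scans as divisors while the other list is nonempty.
def Pre_numTriplets (nums1 : List Int) (nums2 : List Int) : Prop :=
  (nums1 = [] ∨ (0 : Int) ∉ nums2) ∧ (nums2 = [] ∨ (0 : Int) ∉ nums1)
instance (nums1 : List Int) (nums2 : List Int) : Decidable (Pre_numTriplets nums1 nums2) := by
  unfold Pre_numTriplets; infer_instance

def pvWitness_numTriplets : List Int × List Int := ([1, 2], [2, 4, 2])

-- A raises ZeroDivisionError whenever the scanned list contains 0 while the other list is
-- nonempty; B, which never divides, returns the true triplet count there.
def Raises_numTriplets (nums1 : List Int) (nums2 : List Int) : Prop :=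
  (nums1 ≠ [] ∧ (0 : Int) ∈ nums2) ∨ (nums2 ≠ [] ∧ (0 : Int) ∈ nums1)
instance (nums1 : List Int) (nums2 : List Int) : Decidable (Raises_numTriplets nums1 nums2) := by
  unfold Raises_numTriplets; infer_instance

def pvRaiseWitness_numTriplets : List Int × List Int := ([1], [0])
def pvRaiseWitnessOut_numTriplets : Int := 0

def Spec_numTriplets (nums1 : List Int) (nums2 : List Int) (out : Int) : Prop :=
  out = numTriplets_alt nums1 nums2
instance (nums1 : List Int) (nums2 : List Int) (out : Int) : Decidable (Spec_numTriplets nums1 nums2 out) := by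
  unfold Spec_numTriplets; infer_instance

-- ===== CLAIM (what is proved, stated in full; the proofs are below) =====
def Claim_equal_numTriplets : Prop := ∀ (nums1 : List Int) (nums2 : List Int), Dom_numTriplets nums1 nums2 → Pre_numTriplets nums1 nums2 → Spec_numTriplets nums1 nums2 (numTriplets nums1 nums2)

def Claim_raises_numTriplets : Prop := (∀ (nums1 : List Int) (nums2 : List Int), Dom_numTriplets nums1 nums2 → Raises_numTriplets nums1 nums2 → ¬ Pre_numTriplets nums1 nums2) ∧ (Dom_numTriplets (pvRaiseWitness_numTriplets.1) (pvRaiseWitness_numTriplets.2) ∧ Raises_numTriplets (pvRaiseWitness_numTriplets.1) (pvRaiseWitness_numTriplets.2) ∧ numTriplets_alt (pvRaiseWitness_numTriplets.1) (pvRaiseWitness_numTriplets.2) = pvRaiseWitnessOut_numTriplets)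

-- ===== LEMMAS AND PROOFS =====

-- common specification: number of pairs i < j in the list with product t, as an Int
def pvPairCount (t : Int) : List Int → Int
  | [] => 0
  | x :: xs => ((xs.countP (fun y => x * y == t) : Nat) : Int) + pvPairCount t xs

theorem pv_sum_map_add (f g : Int → Int) (l : List Int) :
    (l.map (fun x => f x + g x)).sum = (l.map f).sum + (l.map g).sum := by
  induction l with
  | nil => simp
  | cons a l ih => simp [ih]; ring

theorem pv_countP_sum (p : Int → Bool) (l : List Int) :
    (l.map (fun b => if p b then (1 : Int) else 0)).sum = ((l.countP p : Nat) : Int) := by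
  induction l with
  | nil => simp
  | cons a l ih =>
    simp [List.countP_cons, ih]
    split <;> omega

theorem pv_exchange (R : Int → Int → Bool) (A B : List Int) :
    (A.map (fun a => ((B.countP (fun b => R a b) : Nat) : Int))).sum
      = (B.map (fun b => ((A.countP (fun a => R a b) : Nat) : Int))).sum := by
  induction A with
  | nil => simp
  | cons a A ih =>
    have h1 : (B.map (fun b => ((((a :: A).countP (fun a => R a b)) : Nat) : Int))).sum
        = (B.map (fun b => (if R a b then (1 : Int) else 0) + ((A.countP (fun a => R a b) : Nat) : Int))).sum := by
      apply congrArg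
      apply List.map_congr_left
      intro b _
      simp [List.countP_cons]
      split <;> omega
    rw [h1, pv_sum_map_add, pv_countP_sum]
    simp [ih]

theorem pv_fold_add (f : Int → Int) (l : List Int) (a : Int) :
    l.foldl (fun tot y => tot + f y) a = a + (l.map f).sum := by
  induction l generalizing a with
  | nil => simp
  | cons x l ih => simp [ih]; ring

-- the square counter counts the bases whose square is the key
theorem pv_sqc_getD (b : List Int) (d : PySem.Dict Int Int) (k : Int) :
    (b.foldl (fun sq n => sq.insert (n * n) (sq.getD (n * n) 0 + 1)) d).getD k 0
      = d.getD k 0 + ((b.countP (fun n => n * n == k) : Nat) : Int) := by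
  induction b generalizing d with
  | nil => simp
  | cons a b ih =>
    simp only [List.foldl_cons, ih, PySem.Dict.getD_insert, List.countP_cons]
    by_cases h : k = a * a
    · simp [h]; push_cast; ring
    · have h' : ¬ (a * a == k) = true := by simp [Ne.symm h]
      simp [h, h']

theorem pvSquareCounter_getD (b : List Int) (k : Int) :
    (pvSquareCounter b).getD k 0 = ((b.countP (fun n => n * n == k) : Nat) : Int) := by
  unfold pvSquareCounter
  rw [pv_sqc_getD]
  simp

-- B's pair scan equals the sum over bases of the pair count of their squares
theorem pvPairScan_eq (b : List Int) (l : List Int) :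
    pvPairScan (pvSquareCounter b) l = (b.map (fun n => pvPairCount (n * n) l)).sum := by
  induction l with
  | nil =>
    have h : b.map (fun n => pvPairCount (n * n) []) = b.map (fun _ => (0 : Int)) :=
      List.map_congr_left (fun n _ => rfl)
    simp [pvPairScan, h]
  | cons x xs ih =>
    have h1 : (b.map (fun n => pvPairCount (n * n) (x :: xs))).sum
        = (b.map (fun n => ((xs.countP (fun y => x * y == n * n) : Nat) : Int) + pvPairCount (n * n) xs)).sum := rfl
    rw [pvPairScan, pv_fold_add, ih, h1, pv_sum_map_add]
    have h2 : (xs.map (fun y => (pvSquareCounter b).getD (x * y) 0)).sum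
        = (b.map (fun n => ((xs.countP (fun y => x * y == n * n) : Nat) : Int))).sum := by
      have h3 : (xs.map (fun y => (pvSquareCounter b).getD (x * y) 0)).sum
          = (xs.map (fun y => ((b.countP (fun n => n * n == x * y) : Nat) : Int))).sum := by
        apply congrArg; apply List.map_congr_left; intro y _; rw [pvSquareCounter_getD]
      rw [h3, pv_exchange (fun y n => n * n == x * y)]
      apply congrArg; apply List.map_congr_left; intro n _
      congr 1
      apply List.countP_congr
      intro y _
      simp only [beq_iff_eq]
      exact ⟨Eq.symm, Eq.symm⟩
    rw [h2]
    ring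

-- A's inner loop: invariant over the processed prefix pfx
theorem pv_innerA (t : Int) (l : List Int) : ∀ (pfx : List Int) (res : Int) (d : PySem.Dict Int Int),
    (∀ x ∈ l, x ≠ 0) →
    (∀ k, d.getD k 0 = ((pfx.countP (fun y => PySem.Int.mod t y == 0 && y == k) : Nat) : Int)) →
    (l.foldl (pvStepA t) (res, d)).1
      = res + (l.map (fun x => ((pfx.countP (fun y => y * x == t) : Nat) : Int))).sum + pvPairCount t l := by
  induction l with
  | nil => intro pfx res d _ _; simp [pvPairCount]
  | cons x l ih =>
    intro pfx res d hnz hd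
    have hx : x ≠ 0 := hnz x (List.mem_cons_self)
    by_cases hm : PySem.Int.mod t x = 0
    · -- branch taken: x divides t
      have hdvd : x ∣ t := (PySem.Int.mod_eq_zero_iff_dvd t x).mp hm
      have hfx : PySem.Int.floordiv t x * x = t := by
        simpa [hm] using PySem.Int.floordiv_mul_add_mod t x
      -- the read equals the count of earlier y with y * x = t
      have hread : d.getD (PySem.Int.floordiv t x) 0
          = ((pfx.countP (fun y => y * x == t) : Nat) : Int) := by
        rw [hd]
        congr 1
        apply List.countP_congr
        intro y _
        simp only [Bool.and_eq_true, beq_iff_eq]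
        constructor
        · rintro ⟨-, rfl⟩; exact hfx
        · intro hyx
          constructor
          · exact (PySem.Int.mod_eq_zero_iff_dvd t y).mpr ⟨x, hyx.symm⟩
          · exact mul_right_cancel₀ hx (by rw [hfx, hyx])
      have hstep : pvStepA t (res, d) x
          = (res + d.getD (PySem.Int.floordiv t x) 0, d.insert x (d.getD x 0 + 1)) := by
        simp [pvStepA, hm]
      have hd' : ∀ k, (d.insert x (d.getD x 0 + 1)).getD k 0
          = (((pfx ++ [x]).countP (fun y => PySem.Int.mod t y == 0 && y == k) : Nat) : Int) := by
        intro k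
        rw [PySem.Dict.getD_insert, List.countP_append]
        by_cases hk : k = x
        · subst hk; simp [hm, hd]
        · have : ¬ (x == k) = true := by simp [Ne.symm hk]
          simp [hk, this, hd]
      rw [List.foldl_cons, hstep, ih (pfx ++ [x]) _ _ (fun y hy => hnz y (List.mem_cons_of_mem _ hy)) hd', hread]
      have hmap : (l.map (fun z => (((pfx ++ [x]).countP (fun y => y * z == t) : Nat) : Int))).sum
          = (l.map (fun z => ((pfx.countP (fun y => y * z == t) : Nat) : Int))).sum
            + (l.map (fun z => if x * z == t then (1 : Int) else 0)).sum := by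
        rw [← pv_sum_map_add]
        apply congrArg; apply List.map_congr_left; intro z _
        rw [List.countP_append]
        simp only [List.countP_cons, List.countP_nil]
        push_cast
        split <;> simp
      rw [hmap, pv_countP_sum, List.map_cons, List.sum_cons]
      simp only [pvPairCount]
      ring
    · -- branch not taken: x does not divide t, so nothing can pair with x
      have hnd : ¬ x ∣ t := fun h => hm ((PySem.Int.mod_eq_zero_iff_dvd t x).mpr h)
      have hstep : pvStepA t (res, d) x = (res, d) := by
        simp [pvStepA, hm]
      have hzero1 : (pfx.countP (fun y => y * x == t)) = 0 := by
        apply List.countP_eq_zero.mpr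
        intro y _
        simp only [beq_iff_eq]
        intro hyx; exact hnd ⟨y, by rw [← hyx]; ring⟩
      have hzero2 : (l.countP (fun y => x * y == t)) = 0 := by
        apply List.countP_eq_zero.mpr
        intro y _
        simp only [beq_iff_eq]
        intro hyx; exact hnd ⟨y, hyx.symm⟩
      rw [List.foldl_cons, hstep, ih pfx res d (fun y hy => hnz y (List.mem_cons_of_mem _ hy)) hd]
      simp only [List.map_cons, List.sum_cons, pvPairCount, hzero1, hzero2]
      push_cast
      ring

-- one outer loop of A, when its divisor list has no zero
theorem pvLoopA_eq (outer inner : List Int) (res : Int) (h : ∀ x ∈ inner, x ≠ 0) :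
    pvLoopA res outer inner = res + (outer.map (fun n => pvPairCount (n * n) inner)).sum := by
  unfold pvLoopA
  induction outer generalizing res with
  | nil => simp
  | cons n outer ih =>
    rw [List.foldl_cons, List.map_cons, List.sum_cons]
    have hinner : (inner.foldl (pvStepA (n * n)) (res, PySem.Dict.empty)).1
        = res + pvPairCount (n * n) inner := by
      rw [pv_innerA (n * n) inner [] res PySem.Dict.empty h (by intro k; simp)]
      simp
    rw [hinner, ih]
    ring

-- one side of A equals the corresponding side of B, under that side's precondition
theorem pv_side_eq (outer inner : List Int) (res : Int)
    (h : outer = [] ∨ (0 : Int) ∉ inner) :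
    pvLoopA res outer inner = res + pvPairScan (pvSquareCounter outer) inner := by
  rcases h with h | h
  · subst h
    rw [pvPairScan_eq]
    simp [pvLoopA]
  · rw [pvLoopA_eq outer inner res (fun x hx hx0 => h (hx0 ▸ hx)), pvPairScan_eq]

-- ===== VERDICT (by name: the statement is the Claim_ definition above) =====
theorem numTriplets_spec : Claim_equal_numTriplets := by
  intro nums1 nums2 _ hpre
  obtain ⟨h1, h2⟩ := hpre
  unfold Spec_numTriplets numTriplets numTriplets_alt
  rw [pv_side_eq nums1 nums2 0 h1, pv_side_eq nums2 nums1 _ h2]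
  ring

@[simp]
theorem numTriplets_raises : Claim_raises_numTriplets := by
  unfold Claim_raises_numTriplets
  refine ⟨?_, by decide, by decide, by decide⟩
  intro nums1 nums2 _ hr hpre
  obtain ⟨h1, h2⟩ := hpre
  rcases hr with ⟨ha, hb⟩ | ⟨ha, hb⟩
  · rcases h1 with h | h
    · exact ha h
    · exact h hb
  · rcases h2 with h | h
    · exact ha h
    · exact h hb
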